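-- pv_equiv track=rewrite | github.com/ChengxiC/SD-main | shanghaitech/test_shanghaitech.py | find_anomalies
-- ===== SOURCE A (Python) =====
-- def find_anomalies(array):
--
--     anomalies = []
--     in_anomaly = False
--     start_index = -1
--
--     for i in range(len(array)):
--         if array[i] == 1 and not in_anomaly:
--             start_index = i
--             in_anomaly = True
--         elif array[i] == 0 and in_anomaly:
--             anomalies.append((start_index, i - 1))
--             in_anomaly = False
--
--     if in_anomaly:
--         anomalies.append((start_index, len(array) - 1))
--
--     return anomalies
-- ===== SOURCE B (Python) =====
-- def find_anomalies(array):
--     # forward-fill an 'active' table, then edge-detect starts/ends by zipping shifted copies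
--     active = []
--     flag = False
--     for x in array:
--         if x == 1:
--             flag = True
--         elif x == 0:
--             flag = False
--         active.append(flag)
--     starts = [i for i, (p, c) in enumerate(zip([False] + active, active)) if c and not p]
--     ends = [i for i, (c, nx) in enumerate(zip(active, active[1:] + [False])) if c and not nx]
--     return list(zip(starts, ends))
-- ===== Notes on version B (the rewrite author's own statement) =====
-- stated objective: alternative
-- what changed: Replaces A's single fused state-machine loop (flag + start index + conditional appends + final patch-up) with a forward-filled boolean 'active' table followed by stateless edge detection: starts and ends are read off by zipping the table with shifted copies of itself and the result is zip(starts, ends).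
import Mathlib
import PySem

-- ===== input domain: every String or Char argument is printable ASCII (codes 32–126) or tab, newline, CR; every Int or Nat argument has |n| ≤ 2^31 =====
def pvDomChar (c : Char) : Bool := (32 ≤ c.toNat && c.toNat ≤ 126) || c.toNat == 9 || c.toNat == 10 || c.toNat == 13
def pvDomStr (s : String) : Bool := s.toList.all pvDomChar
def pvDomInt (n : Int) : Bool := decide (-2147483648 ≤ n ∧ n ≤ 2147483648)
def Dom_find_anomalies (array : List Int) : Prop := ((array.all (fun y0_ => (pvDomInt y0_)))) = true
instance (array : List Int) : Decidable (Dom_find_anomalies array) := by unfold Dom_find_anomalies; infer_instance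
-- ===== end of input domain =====

-- B replaces A's fused state-machine loop by a forward-filled boolean table plus
-- stateless edge detection over shifted copies of the table (same O(n) cost).

-- ===== PORT A =====
-- loop body of A's for-loop (state = (anomalies, in_anomaly, start_index))
def aStep (s : List (Int × Int) × Bool × Int) (p : Int × Int) : List (Int × Int) × Bool × Int :=
  if p.2 == 1 && !s.2.1 then (s.1, true, p.1)
  else if p.2 == 0 && s.2.1 then (s.1 ++ [(s.2.2, p.1 - 1)], false, s.2.2)
  else s

def find_anomalies (array : List Int) : List (Int × Int) :=
  let s := (PySem.List.enumerate array 0).foldl aStep ([], false, -1)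
  if s.2.1 then s.1 ++ [(s.2.2, (array.length : Int) - 1)] else s.1

-- ===== PORT B =====
-- loop body of B's forward-fill pass (state = (active, flag))
def bStep (st : List Bool × Bool) (x : Int) : List Bool × Bool :=
  let q := if x == 1 then true else if x == 0 then false else st.2
  (st.1 ++ [q], q)

def find_anomalies_alt (array : List Int) : List (Int × Int) :=
  let active := (array.foldl bStep ([], false)).1
  let starts := ((PySem.List.enumerate (List.zip (false :: active) active) 0).filter
      (fun p => p.2.2 && !p.2.1)).map (fun p => p.1)
  let ends := ((PySem.List.enumerate (List.zip active (active.drop 1 ++ [false])) 0).filter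
      (fun p => p.2.1 && !p.2.2)).map (fun p => p.1)
  List.zip starts ends

-- ===== PRECONDITION & SPEC =====
def Spec_find_anomalies (array : List Int) (out : List (Int × Int)) : Prop := out = find_anomalies_alt array
instance (array : List Int) (out : List (Int × Int)) : Decidable (Spec_find_anomalies array out) := by unfold Spec_find_anomalies; infer_instance

-- ===== CLAIM (what is proved, stated in full; the proofs are below) =====
def Claim_equal_find_anomalies : Prop := ∀ (array : List Int), Dom_find_anomalies array → Spec_find_anomalies array (find_anomalies array)

-- ===== LEMMAS AND PROOFS =====

-- forward-fill of the boolean 'active' table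
def ffill : Bool → List Int → List Bool
  | _, [] => []
  | p, x :: xs => (if x = 1 then true else if x = 0 then false else p) :: ffill (if x = 1 then true else if x = 0 then false else p) xs

-- the runs of an active table, carried start index, lookahead emission
def runsH : Bool → Int → Int → List Bool → List (Int × Int)
  | _, _, _, [] => []
  | prev, st, i, c :: r =>
    (if c ∧ ¬(r.head?.getD false) then [((if c ∧ ¬prev then i else st), i)] else []) ++
      runsH c (if c ∧ ¬prev then i else st) (i + 1) r

-- rising-edge positions
def sListH : Bool → Int → List Bool → List Int
  | _, _, [] => []
  | p, i, c :: r => (if c ∧ ¬p then [i] else []) ++ sListH c (i + 1) r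

-- falling-edge positions (lookahead)
def eListH : Int → List Bool → List Int
  | _, [] => []
  | i, c :: r => (if c ∧ ¬(r.head?.getD false) then [i] else []) ++ eListH (i + 1) r

theorem getLastD_shift (l : List Bool) (a b : Bool) :
    l.getLast?.getD a = (a :: l).getLast?.getD b := by
  cases l with
  | nil => simp
  | cons c t =>
    obtain ⟨y, hy⟩ := Option.isSome_iff_exists.mp (by simp : (c :: t).getLast?.isSome)
    rw [List.getLast?_cons_cons, hy]; rfl

theorem ffill_foldl (xs : List Int) (acc : List Bool) (p : Bool) :
    xs.foldl bStep (acc, p) = (acc ++ ffill p xs, (ffill p xs).getLastD p) := by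
  induction xs generalizing acc p with
  | nil => simp [ffill]
  | cons x xs ih =>
    simp only [List.foldl_cons, bStep, ffill, ih]
    by_cases h1 : x = 1 <;> by_cases h0 : x = 0 <;>
      simp [h1, h0] <;> exact getLastD_shift _ _ _

theorem A_loop (xs : List Int) (i : Int) (acc : List (Int × Int)) (inA : Bool) (st : Int) :
    (if ((PySem.List.enumerate xs i).foldl aStep (acc, inA, st)).2.1 then
        ((PySem.List.enumerate xs i).foldl aStep (acc, inA, st)).1 ++
          [(((PySem.List.enumerate xs i).foldl aStep (acc, inA, st)).2.2, i + (xs.length : Int) - 1)]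
      else ((PySem.List.enumerate xs i).foldl aStep (acc, inA, st)).1)
    = acc ++ (if inA ∧ (ffill inA xs).head?.getD false = false then [(st, i - 1)] else [])
        ++ runsH inA st i (ffill inA xs) := by
  induction xs generalizing i acc inA st with
  | nil =>
    cases inA <;> simp [PySem.List.enumerate_nil, ffill, runsH]
  | cons x xs ih =>
    rw [PySem.List.enumerate_cons]
    simp only [List.foldl_cons, List.length_cons]
    have hlen : i + ((xs.length : Int) + 1) - 1 = (i + 1) + (xs.length : Int) - 1 := by ring
    push_cast
    rw [hlen]
    by_cases h1 : x = 1 <;> by_cases h0 : x = 0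
    · omega
    · -- x = 1
      cases inA with
      | false =>
        have hs : aStep (acc, false, st) (i, x) = (acc, true, i) := by simp [aStep, h1]
        rw [hs, ih]
        simp only [ffill, h1, runsH, List.head?_cons]
        by_cases hh : (ffill true xs).head?.getD false = false <;>
          simp [hh, List.append_assoc]
      | true =>
        have hs : aStep (acc, true, st) (i, x) = (acc, true, st) := by simp [aStep, h1]
        rw [hs, ih]
        simp only [ffill, h1, runsH, List.head?_cons]
        by_cases hh : (ffill true xs).head?.getD false = false <;>
          simp [hh, List.append_assoc]
    · -- x = 0
      cases inA with
      | false =>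
        have hs : aStep (acc, false, st) (i, x) = (acc, false, st) := by simp [aStep, h1, h0]
        rw [hs, ih]
        simp only [ffill, h0, if_neg (by decide : ¬ ((0:Int) = 1)), runsH, List.head?_cons]
        simp [List.append_assoc]
      | true =>
        have hs : aStep (acc, true, st) (i, x) = (acc ++ [(st, i - 1)], false, st) := by
          simp [aStep, h1, h0]
        rw [hs, ih]
        simp only [ffill, h0, if_neg (by decide : ¬ ((0:Int) = 1)), runsH, List.head?_cons]
        simp [List.append_assoc]
    · -- other x: flag kept
      have hs : aStep (acc, inA, st) (i, x) = (acc, inA, st) := by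
        cases inA <;> simp [aStep, h1, h0]
      rw [hs, ih]
      simp only [ffill, if_neg h1, if_neg h0, runsH, List.head?_cons]
      cases inA with
      | false => simp [List.append_assoc]
      | true =>
        by_cases hh : (ffill true xs).head?.getD false = false <;>
          simp [hh, List.append_assoc]

theorem zip_starts (ys : List Bool) (p : Bool) (i : Int) :
    ((PySem.List.enumerate (List.zip (p :: ys) ys) i).filter
        (fun q => q.2.2 && !q.2.1)).map (fun q => q.1) = sListH p i ys := by
  induction ys generalizing p i with
  | nil => simp [sListH, PySem.List.enumerate_nil]
  | cons c r ih =>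
    simp only [List.zip_cons_cons, PySem.List.enumerate_cons, List.filter_cons]
    by_cases hc : c <;> by_cases hp : p <;>
      simp [hc, hp, sListH, ih]

theorem zip_ends (ys : List Bool) (i : Int) :
    ((PySem.List.enumerate (List.zip ys (ys.drop 1 ++ [false])) i).filter
        (fun q => q.2.1 && !q.2.2)).map (fun q => q.1) = eListH i ys := by
  induction ys generalizing i with
  | nil => simp [eListH, PySem.List.enumerate_nil]
  | cons c r ih =>
    have hz : List.zip (c :: r) ((c :: r).drop 1 ++ [false]) =
        (c, r.head?.getD false) :: List.zip r (r.drop 1 ++ [false]) := by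
      cases r <;> simp [List.zip]
    have ih' := ih (i + 1)
    simp only [List.drop_one] at ih' hz ⊢
    rw [hz]
    simp only [PySem.List.enumerate_cons, List.filter_cons]
    by_cases hc : c <;> by_cases hh : r.head?.getD false <;>
      simp [hc, hh, eListH, ih']

theorem runs_zip (ac : List Bool) (prev : Bool) (st i : Int) :
    runsH prev st i ac =
      List.zip ((if prev ∧ ac.head?.getD false then [st] else []) ++ sListH prev i ac)
        (eListH i ac) := by
  induction ac generalizing prev st i with
  | nil => simp [runsH, sListH, eListH]
  | cons c r ih =>
    simp only [runsH, sListH, eListH, List.head?_cons]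
    by_cases hc : c <;> by_cases hp : prev <;>
      by_cases hh : r.head?.getD false <;>
        simp [hc, hp, hh, ih, List.zip_cons_cons]

-- ===== VERDICT (by name: the statement is the Claim_ definition above) =====
theorem find_anomalies_spec : Claim_equal_find_anomalies := by
  intro array _
  show find_anomalies array = find_anomalies_alt array
  simp only [find_anomalies, find_anomalies_alt]
  have hA := A_loop array 0 [] false (-1)
  simp only [zero_add] at hA
  rw [hA, ffill_foldl]
  simp only [List.nil_append, zip_starts, zip_ends]
  rw [runs_zip]
  simp
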